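-- pv_equiv track=rewrite | github.com/Yameni-code/Transport | main.py | search
-- ===== SOURCE A (Python) =====
-- def search(regions, divisions, sub_divisions, name):
--
--     for region in regions:
--         if region.lower() == name.lower():
--             return True, False, False, None, region
--
--     for region in divisions:
--         for division in divisions[region]:
--             if division.lower() == name.lower():
--                 return  False, True, False, region, division
--
--     for division in sub_divisions:
--         for sub_division in sub_divisions[division]:
--             if sub_division.lower() == name.lower():
--                 return False, False, True, division, sub_division
--
--     return False, False, False, None, name
-- ===== SOURCE B (Python) =====
-- def search(regions, divisions, sub_divisions, name):
--     # Build one lowercased-name -> result index (setdefault keeps the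
--     # first, highest-priority entry), then answer with a single lookup.
--     index = {}
--     for region in regions:
--         index.setdefault(region.lower(), (True, False, False, None, region))
--     for region, divs in divisions.items():
--         for division in divs:
--             index.setdefault(division.lower(), (False, True, False, region, division))
--     for division, subs in sub_divisions.items():
--         for sub_division in subs:
--             index.setdefault(sub_division.lower(), (False, False, True, division, sub_division))
--     return index.get(name.lower(), (False, False, False, None, name))
-- ===== Notes on version B (the rewrite author's own statement) =====
-- stated objective: idiomatic
-- what changed: B builds one dict index from lowercased names to full result tuples (setdefault preserving the regions > divisions > sub_divisions priority) and answers with a single lookup, replacing A's chain of nested linear scans that recompute name.lower() at every comparison.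
import Mathlib
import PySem

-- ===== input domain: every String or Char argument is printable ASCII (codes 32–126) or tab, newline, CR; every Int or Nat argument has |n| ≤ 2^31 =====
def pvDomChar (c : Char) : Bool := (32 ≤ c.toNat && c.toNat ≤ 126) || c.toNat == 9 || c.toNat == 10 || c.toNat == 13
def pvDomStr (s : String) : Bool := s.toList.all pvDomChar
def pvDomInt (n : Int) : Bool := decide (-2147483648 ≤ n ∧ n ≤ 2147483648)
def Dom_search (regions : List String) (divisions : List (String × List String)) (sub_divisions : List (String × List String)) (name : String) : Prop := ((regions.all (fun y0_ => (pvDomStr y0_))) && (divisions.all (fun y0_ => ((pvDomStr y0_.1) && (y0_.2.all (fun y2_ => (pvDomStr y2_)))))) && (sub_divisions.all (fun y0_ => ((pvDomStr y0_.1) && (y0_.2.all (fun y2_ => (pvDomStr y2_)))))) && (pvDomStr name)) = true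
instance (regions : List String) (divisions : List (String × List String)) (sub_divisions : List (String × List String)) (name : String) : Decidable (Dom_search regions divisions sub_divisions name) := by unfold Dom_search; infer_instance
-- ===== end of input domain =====

-- B replaces A's chain of nested linear scans by building one lowercased-name → result
-- index dict (setdefault keeps the first, highest-priority entry) and doing a single lookup.

abbrev SRes : Type := Bool × Bool × Bool × Option String × String

-- ===== PORT A =====
-- one linear scan: first element whose .lower() equals name.lower(), mapped through f
def findIn (xs : List String) (f : String → SRes) (name : String) : Option SRes :=
  match xs with
  | [] => none
  | x :: rest =>
    if PySem.Str.lower x == PySem.Str.lower name then some (f x) else findIn rest f name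

-- 'for region in d: for division in d[region]: …'  (d[region] ported as getD; the key
-- comes from the dict itself, so under Pre_search's unique keys the lookup never misses)
def dictLoop (whole : List (String × List String)) (mkR : String → String → SRes) :
    List (String × List String) → String → Option SRes
  | [], _ => none
  | p :: rest, name =>
    match findIn ((PySem.Dict.mk whole).getD p.1 []) (fun s => mkR p.1 s) name with
    | some r => some r
    | none => dictLoop whole mkR rest name

def search (regions : List String) (divisions : List (String × List String)) (sub_divisions : List (String × List String)) (name : String) : Bool × Bool × Bool × Option String × String :=
  match findIn regions (fun r => (true, false, false, none, r)) name with
  | some out => out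
  | none =>
    match dictLoop divisions (fun reg d => (false, true, false, some reg, d)) divisions name with
    | some out => out
    | none =>
      match dictLoop sub_divisions (fun reg d => (false, false, true, some reg, d)) sub_divisions name with
      | some out => out
      | none => (false, false, false, none, name)

-- ===== PORT B =====
def search_alt (regions : List String) (divisions : List (String × List String)) (sub_divisions : List (String × List String)) (name : String) : Bool × Bool × Bool × Option String × String :=
  let d0 := regions.foldl
    (fun d r => d.setdefault (PySem.Str.lower r) (true, false, false, none, r)) PySem.Dict.empty
  let d1 := divisions.foldl
    (fun d p => p.2.foldl (fun d s => d.setdefault (PySem.Str.lower s) (false, true, false, some p.1, s)) d) d0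
  let d2 := sub_divisions.foldl
    (fun d p => p.2.foldl (fun d s => d.setdefault (PySem.Str.lower s) (false, false, true, some p.1, s)) d) d1
  d2.getD (PySem.Str.lower name) (false, false, false, none, name)

-- ===== PRECONDITION & SPEC =====
-- The two association lists stand for Python dicts, which cannot hold duplicate keys;
-- Pre_search requires exactly that dict invariant (distinct keys) and nothing more.
def Pre_search (regions : List String) (divisions : List (String × List String)) (sub_divisions : List (String × List String)) (name : String) : Prop :=
  (divisions.map Prod.fst).Nodup ∧ (sub_divisions.map Prod.fst).Nodup
instance (regions : List String) (divisions : List (String × List String)) (sub_divisions : List (String × List String)) (name : String) : Decidable (Pre_search regions divisions sub_divisions name) := by unfold Pre_search; infer_instance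

def pvWitness_search : List String × (List (String × List String)) × (List (String × List String)) × String :=
  (["North"], [("North", ["Adamawa"])], [("Adamawa", ["Demsa"])], "demsa")

def Spec_search (regions : List String) (divisions : List (String × List String)) (sub_divisions : List (String × List String)) (name : String) (out : Bool × Bool × Bool × Option String × String) : Prop := out = search_alt regions divisions sub_divisions name
instance (regions : List String) (divisions : List (String × List String)) (sub_divisions : List (String × List String)) (name : String) (out : Bool × Bool × Bool × Option String × String) : Decidable (Spec_search regions divisions sub_divisions name out) := by unfold Spec_search; infer_instance

-- ===== CLAIM (what is proved, stated in full; the proofs are below) =====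
def Claim_equal_search : Prop := ∀ (regions : List String) (divisions : List (String × List String)) (sub_divisions : List (String × List String)) (name : String), Dom_search regions divisions sub_divisions name → Pre_search regions divisions sub_divisions name → Spec_search regions divisions sub_divisions name (search regions divisions sub_divisions name)

-- ===== LEMMAS AND PROOFS =====

def flatPairs (ps : List (String × List String)) : List (String × String) :=
  ps.flatMap (fun p => p.2.map (fun s => (p.1, s)))

theorem find?_flatPairs_cons (p : String × List String) (ps : List (String × List String)) (q : String) :
    (flatPairs (p :: ps)).find? (fun x => PySem.Str.lower x.2 == q)
      = ((p.2.find? (fun s => PySem.Str.lower s == q)).map (fun s => (p.1, s))).or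
          ((flatPairs ps).find? (fun x => PySem.Str.lower x.2 == q)) := by
  unfold flatPairs
  rw [List.flatMap_cons, List.find?_append, List.find?_map]
  rfl

theorem get?_foldl_setdefault {α : Type} (k : α → String) (v : α → SRes)
    (xs : List α) (d : PySem.Dict String SRes) (q : String) :
    (xs.foldl (fun d x => d.setdefault (k x) (v x)) d).get? q
      = (d.get? q).or ((xs.find? (fun x => k x == q)).map v) := by
  induction xs generalizing d with
  | nil => simp
  | cons x xs ih =>
    simp only [List.foldl_cons, List.find?_cons]
    rw [ih]
    by_cases hq : (k x == q) = true
    · have hq' : k x = q := by simpa using hq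
      subst hq'
      rw [PySem.Dict.get?_setdefault_self]
      cases h : d.get? (k x) <;> simp [Option.or]
    · have hne : q ≠ k x := fun h => hq (by simp [h])
      rw [PySem.Dict.get?_setdefault_of_ne _ _ hne]
      simp [hq]

theorem get?_foldl_setdefault_pairs (mk2 : String → String → SRes)
    (ps : List (String × List String)) (d : PySem.Dict String SRes) (q : String) :
    (ps.foldl (fun d p => p.2.foldl
        (fun d s => d.setdefault (PySem.Str.lower s) (mk2 p.1 s)) d) d).get? q
      = (d.get? q).or (((flatPairs ps).find? (fun x => PySem.Str.lower x.2 == q)).map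
          (fun x => mk2 x.1 x.2)) := by
  induction ps generalizing d with
  | nil => simp [flatPairs]
  | cons p ps ih =>
    simp only [List.foldl_cons]
    rw [ih, get?_foldl_setdefault (fun s => PySem.Str.lower s) (fun s => mk2 p.1 s),
        find?_flatPairs_cons]
    cases d.get? q <;>
      cases p.2.find? (fun s => PySem.Str.lower s == q) <;>
        cases (flatPairs ps).find? (fun x => PySem.Str.lower x.2 == q) <;>
          simp [Option.or]

theorem findIn_eq (xs : List String) (f : String → SRes) (name : String) :
    findIn xs f name = (xs.find? (fun x => PySem.Str.lower x == PySem.Str.lower name)).map f := by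
  induction xs with
  | nil => simp [findIn]
  | cons x xs ih =>
    simp only [findIn, List.find?_cons]
    by_cases h : (PySem.Str.lower x == PySem.Str.lower name) = true <;> simp [h, ih]

theorem getD_whole (l : List (String × List String)) (hnd : (l.map Prod.fst).Nodup) :
    ∀ p ∈ l, (PySem.Dict.mk l).getD p.1 [] = p.2 := by
  intro p hp
  apply PySem.Dict.getD_of_mem_items (PySem.Dict.mk l) (k := p.1) (v := p.2)
  · exact hp
  · simpa [PySem.Dict.keys] using hnd

theorem dictLoop_eq (whole : List (String × List String)) (mkR : String → String → SRes)
    (rest : List (String × List String)) (name : String)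
    (h : ∀ p ∈ rest, (PySem.Dict.mk whole).getD p.1 [] = p.2) :
    dictLoop whole mkR rest name
      = ((flatPairs rest).find? (fun x => PySem.Str.lower x.2 == PySem.Str.lower name)).map
          (fun x => mkR x.1 x.2) := by
  induction rest with
  | nil => simp [dictLoop, flatPairs]
  | cons p ps ih =>
    simp only [dictLoop]
    rw [h p (List.mem_cons_self), findIn_eq, find?_flatPairs_cons,
        ih (fun q hq => h q (List.mem_cons_of_mem _ hq))]
    cases p.2.find? (fun s => PySem.Str.lower s == PySem.Str.lower name) <;>
      cases (flatPairs ps).find? (fun x => PySem.Str.lower x.2 == PySem.Str.lower name) <;>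
        simp [Option.or]

-- ===== VERDICT (by name: the statement is the Claim_ definition above) =====
theorem search_spec : Claim_equal_search := by
  intro regions divisions sub_divisions name _hdom hpre
  unfold Spec_search
  unfold search search_alt
  rw [findIn_eq,
      dictLoop_eq _ _ _ _ (getD_whole _ hpre.1),
      dictLoop_eq _ _ _ _ (getD_whole _ hpre.2),
      PySem.Dict.getD_eq_get?_getD,
      get?_foldl_setdefault_pairs (fun reg s => (false, false, true, some reg, s)),
      get?_foldl_setdefault_pairs (fun reg s => (false, true, false, some reg, s)),
      get?_foldl_setdefault (fun r => PySem.Str.lower r) (fun r => (true, false, false, none, r))]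
  cases regions.find? (fun x => PySem.Str.lower x == PySem.Str.lower name) <;>
  cases (flatPairs divisions).find? (fun x => PySem.Str.lower x.2 == PySem.Str.lower name) <;>
  cases (flatPairs sub_divisions).find? (fun x => PySem.Str.lower x.2 == PySem.Str.lower name) <;>
    simp [Option.or]
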